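-- pv_equiv track=rewrite | github.com/TimeB1729/codeforces | round 1026 (div 2)/pA.py | min_operations_to_fashionable
-- ===== SOURCE A (Python) =====
-- def min_operations_to_fashionable(t, test_cases):
--     results = []
--     for case in test_cases:
--         n, a = case
--         a.sort()
--         found = False
--         min_ops = n
--
--         for i in range(n):
--             for j in range(i + 1, n):
--                 if (a[i] + a[j]) % 2 == 0:
--                     ops = i + (n - 1 - j)
--                     if ops < min_ops:
--                         min_ops = ops
--                         found = True
--
--         results.append(min_ops if found else n - 1)
--     return results
-- ===== SOURCE B (Python) =====
-- def min_operations_to_fashionable(t, test_cases):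
--     # Per parity class, one pass over the sorted array tracks (first, last)
--     # sorted index; the best answer combines the extremes of each class.
--     # Like A, this sorts each case's list in place (same observable mutation).
--     results = []
--     for n, a in test_cases:
--         a.sort()
--         ev = od = None
--         for i, x in enumerate(a):
--             if i >= n:
--                 break
--             if x % 2 == 0:
--                 ev = (ev[0], i) if ev else (i, i)
--             else:
--                 od = (od[0], i) if od else (i, i)
--         best = None
--         for pr in (ev, od):
--             if pr and pr[0] < pr[1]:
--                 ops = pr[0] + (n - 1 - pr[1])
--                 if best is None or ops < best:
--                     best = ops
--         results.append(best if best is not None else n - 1)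
--     return results
-- ===== Notes on version B (the rewrite author's own statement) =====
-- stated objective: faster
-- what changed: Replaced A's O(n^2) scan over all same-parity index pairs by one pass over the sorted array that records, per parity class, the first and last index, combining these extremes for the answer.
import Mathlib
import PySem

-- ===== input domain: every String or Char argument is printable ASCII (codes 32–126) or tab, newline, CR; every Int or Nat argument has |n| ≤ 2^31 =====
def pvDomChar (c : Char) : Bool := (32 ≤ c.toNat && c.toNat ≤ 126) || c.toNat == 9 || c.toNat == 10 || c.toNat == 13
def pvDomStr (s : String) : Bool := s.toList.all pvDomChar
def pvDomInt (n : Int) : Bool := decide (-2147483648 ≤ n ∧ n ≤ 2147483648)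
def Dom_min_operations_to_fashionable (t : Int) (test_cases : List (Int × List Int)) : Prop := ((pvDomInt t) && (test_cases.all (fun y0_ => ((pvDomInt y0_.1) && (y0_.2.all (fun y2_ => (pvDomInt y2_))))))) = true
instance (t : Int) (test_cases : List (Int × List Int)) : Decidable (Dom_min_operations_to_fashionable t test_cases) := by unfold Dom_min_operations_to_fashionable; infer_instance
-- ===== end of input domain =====

-- B replaces A's O(n^2) scan over all same-parity index pairs by one pass per case that
-- tracks, per parity class, the first and last sorted index (asymptotically faster).
-- Both versions sort each case's list in place in Python; the equivalence proved here is
-- about the return value.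

-- ===== PORT A =====
def min_operations_to_fashionable (t : Int) (test_cases : List (Int × List Int)) : List Int :=
  test_cases.foldl (fun results case =>
    let n := case.1
    let a := PySem.List.sorted case.2 (fun x => x) false
    let st := (PySem.List.pyRange 0 n 1).foldl (fun st i =>
        (PySem.List.pyRange (i + 1) n 1).foldl (fun st j =>
          -- a[i], a[j]: in range under Pre_ (pyGetD used as the total form)
          if PySem.Int.mod (PySem.List.pyGetD a i 0 + PySem.List.pyGetD a j 0) 2 = 0 then
            (let ops := i + (n - 1 - j)
             if ops < st.2 then (true, ops) else st)
          else st) st) ((false : Bool), n)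
    results ++ [if st.1 then st.2 else n - 1]) []

-- ===== PORT B =====
-- 'ev = (ev[0], i) if ev else (i, i)'
def pvUpd (pr : Option (Int × Int)) (i : Int) : Option (Int × Int) :=
  match pr with
  | some p => some (p.1, i)
  | none => some (i, i)

-- 'for i, x in enumerate(a): if i >= n: break; …' with (first, last) per parity
def pvScanB (n : Int) : List (Int × Int) → Option (Int × Int) → Option (Int × Int) → Option (Int × Int) × Option (Int × Int)
  | [], ev, od => (ev, od)
  | (i, x) :: rest, ev, od =>
      if n ≤ i then (ev, od)
      else if PySem.Int.mod x 2 = 0 then pvScanB n rest (pvUpd ev i) od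
      else pvScanB n rest ev (pvUpd od i)

-- 'for pr in (ev, od): if pr and pr[0] < pr[1]: …'
def pvBestB (n : Int) (prs : List (Option (Int × Int))) : Option Int :=
  prs.foldl (fun best pr =>
    match pr with
    | none => best
    | some p =>
        if p.1 < p.2 then
          (let ops := p.1 + (n - 1 - p.2)
           match best with
           | none => some ops
           | some b => if ops < b then some ops else some b)
        else best) none

def min_operations_to_fashionable_alt (t : Int) (test_cases : List (Int × List Int)) : List Int :=
  test_cases.foldl (fun results case =>
    let n := case.1
    let a := PySem.List.sorted case.2 (fun x => x) false
    let eo := pvScanB n (PySem.List.enumerate a 0) none none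
    results ++ [match pvBestB n [eo.1, eo.2] with
                | some v => v
                | none => n - 1]) []

-- ===== PRECONDITION & SPEC =====
-- Pre_ excludes exactly the test cases on which A raises IndexError: n ≥ 2 together with
-- n > len(a) (for n ≤ 1 the indexing loop body is never reached, so A returns).
def Pre_min_operations_to_fashionable (t : Int) (test_cases : List (Int × List Int)) : Prop :=
  ∀ c ∈ test_cases, c.1 ≤ PySem.List.len c.2 ∨ c.1 ≤ 1
instance (t : Int) (test_cases : List (Int × List Int)) : Decidable (Pre_min_operations_to_fashionable t test_cases) := by unfold Pre_min_operations_to_fashionable; infer_instance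

def pvWitness_min_operations_to_fashionable : Int × (List (Int × List Int)) :=
  (2, [(4, [3, 1, 2, 8]), (1, []), (3, [5, 7, 9])])

def Spec_min_operations_to_fashionable (t : Int) (test_cases : List (Int × List Int)) (out : List Int) : Prop := out = min_operations_to_fashionable_alt t test_cases
instance (t : Int) (test_cases : List (Int × List Int)) (out : List Int) : Decidable (Spec_min_operations_to_fashionable t test_cases out) := by unfold Spec_min_operations_to_fashionable; infer_instance

-- ===== CLAIM (what is proved, stated in full; the proofs are below) =====
def Claim_equal_min_operations_to_fashionable : Prop := ∀ (t : Int) (test_cases : List (Int × List Int)), Dom_min_operations_to_fashionable t test_cases → Pre_min_operations_to_fashionable t test_cases → Spec_min_operations_to_fashionable t test_cases (min_operations_to_fashionable t test_cases)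

-- ===== LEMMAS AND PROOFS =====

-- per-case value of A (definitionally the body of A's fold)
def pvAval (n : Int) (b : List Int) : Int :=
  let st := (PySem.List.pyRange 0 n 1).foldl (fun st i =>
      (PySem.List.pyRange (i + 1) n 1).foldl (fun st j =>
        if PySem.Int.mod (PySem.List.pyGetD b i 0 + PySem.List.pyGetD b j 0) 2 = 0 then
          (let ops := i + (n - 1 - j)
           if ops < st.2 then (true, ops) else st)
        else st) st) ((false : Bool), n)
  if st.1 then st.2 else n - 1

-- per-case value of B
def pvBval (n : Int) (b : List Int) : Int :=
  let eo := pvScanB n (PySem.List.enumerate b 0) none none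
  match pvBestB n [eo.1, eo.2] with
  | some v => v
  | none => n - 1

def pvStep (st : Bool × Int) (v : Int) : Bool × Int := if v < st.2 then (true, v) else st

-- candidate operation counts of A for a fixed outer index i
def pvVs (b : List Int) (n i : Int) : List Int :=
  ((PySem.List.pyRange (i + 1) n 1).filter
      (fun j => decide (PySem.Int.mod (PySem.List.pyGetD b i 0 + PySem.List.pyGetD b j 0) 2 = 0))).map
    (fun j => i + (n - 1 - j))

-- all candidate operation counts of A
def pvV (b : List Int) (n : Int) : List Int := ((PySem.List.pyRange 0 n 1).map (pvVs b n)).flatten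

def pvFL (st : Option (Int × Int)) (idxs : List Int) : Option (Int × Int) := idxs.foldl pvUpd st

def pvEIdx (l : List (Int × Int)) : List Int :=
  (l.filter (fun p => decide (PySem.Int.mod p.2 2 = 0))).map (·.1)
def pvOIdx (l : List (Int × Int)) : List Int :=
  (l.filter (fun p => !decide (PySem.Int.mod p.2 2 = 0))).map (·.1)

lemma pv_parity (x y : Int) :
    PySem.Int.mod (x + y) 2 = 0 ↔ PySem.Int.mod x 2 = PySem.Int.mod y 2 := by
  rw [PySem.Int.mod_eq_emod_of_pos (b := 2) (by norm_num) (a := x + y),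
      PySem.Int.mod_eq_emod_of_pos (b := 2) (by norm_num) (a := x),
      PySem.Int.mod_eq_emod_of_pos (b := 2) (by norm_num) (a := y)]
  omega

lemma pv_step_closed (vs : List Int) : ∀ (st : Bool × Int),
    vs.foldl pvStep st = (st.1 || vs.any (fun v => decide (v < st.2)), vs.foldl min st.2) := by
  induction vs with
  | nil => intro st; simp
  | cons v t ih =>
    intro st
    by_cases hv : v < st.2
    · simp only [List.foldl_cons, List.any_cons, pvStep, if_pos hv, ih, decide_eq_true hv]
      simp [min_eq_right (le_of_lt hv)]
    · simp only [List.foldl_cons, List.any_cons, pvStep, if_neg hv, ih]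
      simp [min_eq_left (by omega : st.2 ≤ v), hv]

lemma pv_any_lt {n : Int} {l : List Int} (h : ∀ v ∈ l, v < n) :
    l.any (fun v => decide (v < n)) = !l.isEmpty := by
  cases l with
  | nil => simp
  | cons v t => simp [h v (by simp)]

lemma pv_any_flatten {α : Type} (f : α → List Int) (is : List α) :
    is.any (fun i => !(f i).isEmpty) = !((is.map f).flatten).isEmpty := by
  induction is with
  | nil => simp
  | cons i t ih => cases h : f i <;> simp [h, ih]

lemma pv_A_gen (n : Int) (vsf : Int → List Int) :
    ∀ (is : List Int) (st : Bool × Int), (∀ i ∈ is, ∀ v ∈ vsf i, v < n) → st.2 ≤ n →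
      (st.1 = false → st.2 = n) →
      is.foldl (fun st i => (vsf i).foldl pvStep st) st =
        (st.1 || is.any (fun i => !(vsf i).isEmpty), ((is.map vsf).flatten).foldl min st.2) := by
  intro is
  induction is with
  | nil => intro st _ _ _; simp
  | cons i t ih =>
    intro st hb hle hfn
    have hbi : ∀ v ∈ vsf i, v < n := hb i (by simp)
    have hstep : (vsf i).foldl pvStep st = (st.1 || !(vsf i).isEmpty, (vsf i).foldl min st.2) := by
      rw [pv_step_closed]
      cases hst1 : st.1 with
      | true => simp
      | false => rw [hfn hst1, pv_any_lt hbi]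
    simp only [List.foldl_cons, hstep, List.any_cons, List.map_cons, List.flatten_cons,
      List.foldl_append]
    rw [ih _ (fun j hj => hb j (by simp [hj]))]
    · simp [Bool.or_assoc]
    · exact le_trans (PySem.List.foldl_min_le (vsf i) st.2).1 hle
    · intro hf
      cases hst1 : st.1 with
      | true => simp [hst1] at hf
      | false =>
        simp [hst1] at hf
        simp [hf, hfn hst1]

lemma pv_scan_split (n : Int) :
    ∀ (l1 l2 : List (Int × Int)) (ev od : Option (Int × Int)),
      (∀ p ∈ l1, p.1 < n) → (l2 = [] ∨ ∃ i x t, l2 = (i, x) :: t ∧ n ≤ i) →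
      pvScanB n (l1 ++ l2) ev od = (pvFL ev (pvEIdx l1), pvFL od (pvOIdx l1)) := by
  intro l1
  induction l1 with
  | nil =>
    intro l2 ev od _ h2
    rcases h2 with rfl | ⟨i, x, tl, rfl, hi⟩
    · rfl
    · simp [pvScanB, hi, pvEIdx, pvOIdx, pvFL]
  | cons p t ih =>
    intro l2 ev od h1 h2
    obtain ⟨i, x⟩ := p
    have hi : i < n := h1 (i, x) (by simp)
    by_cases hm : PySem.Int.mod x 2 = 0
    · have hd : (2 : Int) ∣ x := (PySem.Int.mod_eq_zero_iff_dvd x 2).mp hm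
      simp only [List.cons_append, pvScanB, if_neg (by omega : ¬ n ≤ i), if_pos hm]
      rw [ih l2 _ _ (fun q hq => h1 q (by simp [hq])) h2]
      simp [pvEIdx, pvOIdx, hd, pvFL]
    · have hd : ¬ (2 : Int) ∣ x := fun d => hm ((PySem.Int.mod_eq_zero_iff_dvd x 2).mpr d)
      simp only [List.cons_append, pvScanB, if_neg (by omega : ¬ n ≤ i), if_neg hm]
      rw [ih l2 _ _ (fun q hq => h1 q (by simp [hq])) h2]
      simp [pvEIdx, pvOIdx, hd, pvFL]

lemma pv_FL_some (pr : Int × Int) (idxs : List Int) :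
    pvFL (some pr) idxs = some (pr.1, idxs.getLastD pr.2) := by
  induction idxs generalizing pr with
  | nil => rfl
  | cons i t ih =>
    have h0 : pvFL (some pr) (i :: t) = pvFL (some (pr.1, i)) t := rfl
    rw [h0, ih, List.getLastD_cons]

lemma pv_FL_none (idxs : List Int) :
    pvFL none idxs = match idxs with
      | [] => none
      | h :: t => some (h, t.getLastD h) := by
  cases idxs with
  | nil => rfl
  | cons h t => simpa [pvFL, pvUpd] using pv_FL_some (h, h) t


def pvCand (n : Int) (L : List Int) : Option Int :=
  match L with
  | [] => none
  | h :: t => if h < t.getLastD h then some (h + (n - 1 - t.getLastD h)) else none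

def pvCombine (a b : Option Int) : Option Int :=
  match a, b with
  | none, none => none
  | some x, none => some x
  | none, some y => some y
  | some x, some y => some (if y < x then y else x)

lemma pv_best_eq (n : Int) (E O : List Int) :
    pvBestB n [pvFL none E, pvFL none O] = pvCombine (pvCand n E) (pvCand n O) := by
  cases E with
  | nil =>
    cases O with
    | nil => rfl
    | cons h t =>
      simp only [pv_FL_none, pvBestB, List.foldl_cons, List.foldl_nil, pvCand, pvCombine,
        List.getLastD_eq_getLast?]
      split_ifs <;> simp
  | cons h t =>
    cases O with
    | nil =>
      simp only [pv_FL_none, pvBestB, List.foldl_cons, List.foldl_nil, pvCand, pvCombine,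
        List.getLastD_eq_getLast?]
      split_ifs <;> simp
    | cons h' t' =>
      simp only [pv_FL_none, pvBestB, List.foldl_cons, List.foldl_nil, pvCand, pvCombine,
        List.getLastD_eq_getLast?]
      split_ifs <;> simp
      all_goals rw [apply_ite Option.some]

lemma pv_sorted_bounds : ∀ {h : Int} {t : List Int}, (h :: t).Pairwise (· < ·) →
    ∀ x ∈ h :: t, h ≤ x ∧ x ≤ t.getLastD h := by
  intro h t
  induction t generalizing h with
  | nil =>
    intro _ x hx
    simp only [List.mem_singleton] at hx
    simp [hx]
  | cons y t' ih =>
    intro hp x hx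
    have hhy : h < y := (List.pairwise_cons.mp hp).1 y (by simp)
    have hp' : (y :: t').Pairwise (· < ·) := (List.pairwise_cons.mp hp).2
    rw [List.getLastD_cons]
    rcases List.mem_cons.mp hx with rfl | hx'
    · exact ⟨le_refl x, le_trans (le_of_lt hhy) (ih hp' y (by simp)).2⟩
    · have h2 := ih hp' x hx'
      exact ⟨le_trans (le_of_lt hhy) h2.1, h2.2⟩

lemma pv_mem_EIdx (c : List Int) (i : Int) :
    i ∈ pvEIdx (PySem.List.enumerate c 0) ↔
      ∃ m : Nat, m < c.length ∧ i = (m : Int) ∧ PySem.Int.mod (c.getD m 0) 2 = 0 := by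
  unfold pvEIdx
  simp only [List.mem_map, List.mem_filter, PySem.List.mem_enumerate_iff]
  constructor
  · rintro ⟨p, ⟨⟨m, hm, rfl⟩, hdec⟩, rfl⟩
    exact ⟨m, hm, by simp, by simpa [List.getD_eq_getElem?_getD, List.getElem?_eq_getElem hm] using hdec⟩
  · rintro ⟨m, hm, rfl, hmod⟩
    exact ⟨((m : Int), c.getD m 0), ⟨⟨m, hm,
      by simp [List.getD_eq_getElem?_getD, List.getElem?_eq_getElem hm]⟩, by simpa using hmod⟩, rfl⟩

lemma pv_mem_OIdx (c : List Int) (i : Int) :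
    i ∈ pvOIdx (PySem.List.enumerate c 0) ↔
      ∃ m : Nat, m < c.length ∧ i = (m : Int) ∧ ¬ PySem.Int.mod (c.getD m 0) 2 = 0 := by
  unfold pvOIdx
  simp only [List.mem_map, List.mem_filter, PySem.List.mem_enumerate_iff]
  constructor
  · rintro ⟨p, ⟨⟨m, hm, rfl⟩, hdec⟩, rfl⟩
    exact ⟨m, hm, by simp, by simpa [List.getD_eq_getElem?_getD, List.getElem?_eq_getElem hm] using hdec⟩
  · rintro ⟨m, hm, rfl, hmod⟩
    exact ⟨((m : Int), c.getD m 0), ⟨⟨m, hm,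
      by simp [List.getD_eq_getElem?_getD, List.getElem?_eq_getElem hm]⟩, by simpa using hmod⟩, rfl⟩

lemma pv_Idx_sorted (c : List Int) (f : Int × Int → Bool) :
    ((((PySem.List.enumerate c 0)).filter f).map (·.1)).Pairwise (· < ·) := by
  rw [List.pairwise_map]
  exact List.Pairwise.filter f (PySem.List.pairwise_lt_enumerate c 0)

lemma pv_mem_V (b : List Int) (n v : Int) :
    v ∈ pvV b n ↔ ∃ i j : Int, 0 ≤ i ∧ i < j ∧ j < n ∧
      PySem.Int.mod (PySem.List.pyGetD b i 0 + PySem.List.pyGetD b j 0) 2 = 0 ∧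
      v = i + (n - 1 - j) := by
  unfold pvV pvVs
  simp only [List.mem_flatten, List.mem_map, List.mem_filter, PySem.List.mem_pyRange_one]
  constructor
  · rintro ⟨l, ⟨i, ⟨hi0, hin⟩, rfl⟩, hv⟩
    simp only [List.mem_map, List.mem_filter, PySem.List.mem_pyRange_one] at hv
    obtain ⟨j, ⟨⟨hj1, hj2⟩, hdec⟩, rfl⟩ := hv
    exact ⟨i, j, hi0, by omega, hj2, by simpa using hdec, rfl⟩
  · rintro ⟨i, j, hi0, hij, hjn, hpar, rfl⟩
    refine ⟨_, ⟨i, ⟨hi0, by omega⟩, rfl⟩, ?_⟩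
    simp only [List.mem_map, List.mem_filter, PySem.List.mem_pyRange_one]
    exact ⟨j, ⟨⟨by omega, hjn⟩, by simpa using hpar⟩, rfl⟩

lemma pv_V_lt (b : List Int) (n : Int) : ∀ v ∈ pvV b n, v < n := by
  intro v hv
  rw [pv_mem_V] at hv
  obtain ⟨i, j, hi0, hij, hjn, _, rfl⟩ := hv
  omega

lemma pv_Aval_eq (n : Int) (b : List Int) :
    pvAval n b = if (pvV b n).isEmpty then n - 1 else (pvV b n).foldl min n := by
  have hinner : ∀ (i : Int) (st : Bool × Int),
      (PySem.List.pyRange (i + 1) n 1).foldl (fun st j =>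
        if PySem.Int.mod (PySem.List.pyGetD b i 0 + PySem.List.pyGetD b j 0) 2 = 0 then
          (let ops := i + (n - 1 - j)
           if ops < st.2 then (true, ops) else st)
        else st) st = (pvVs b n i).foldl pvStep st := by
    intro i st
    rw [PySem.List.foldl_ite_eq_foldl_filter]
    unfold pvVs
    rw [List.foldl_map]
    rfl
  have hbound : ∀ i ∈ PySem.List.pyRange 0 n 1, ∀ v ∈ pvVs b n i, v < n := by
    intro i hi v hv
    exact pv_V_lt b n v (by
      unfold pvV
      exact List.mem_flatten.mpr ⟨pvVs b n i, List.mem_map.mpr ⟨i, hi, rfl⟩, hv⟩)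
  have houter : (PySem.List.pyRange 0 n 1).foldl (fun st i =>
      (PySem.List.pyRange (i + 1) n 1).foldl (fun st j =>
        if PySem.Int.mod (PySem.List.pyGetD b i 0 + PySem.List.pyGetD b j 0) 2 = 0 then
          (let ops := i + (n - 1 - j)
           if ops < st.2 then (true, ops) else st)
        else st) st) ((false : Bool), n)
      = (PySem.List.pyRange 0 n 1).foldl (fun st i => (pvVs b n i).foldl pvStep st) ((false : Bool), n) :=
    congrFun (congrFun (congrArg List.foldl (funext fun st => funext fun i => hinner i st)) _) _
  simp only [pvAval]
  rw [houter, pv_A_gen n (pvVs b n) _ _ hbound (le_refl n) (fun _ => rfl)]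
  rw [pv_any_flatten (pvVs b n) (PySem.List.pyRange 0 n 1)]
  show (if !(pvV b n).isEmpty then _ else _) = _
  cases hE : (pvV b n).isEmpty <;> simp [hE, pvV]

lemma pv_case (n : Int) (b : List Int) (h : n ≤ (b.length : Int) ∨ n ≤ 1) :
    pvAval n b = pvBval n b := by
  by_cases hn0 : n ≤ 0
  · have hA : pvAval n b = n - 1 := by
      simp only [pvAval]
      rw [PySem.List.pyRange_one_eq_nil (by omega)]
      rfl
    have hscan : pvScanB n (PySem.List.enumerate b 0) none none = (none, none) := by
      cases b with
      | nil => rfl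
      | cons x r =>
        rw [PySem.List.enumerate_cons]
        simp [pvScanB, (by omega : n ≤ (0 : Int))]
    have hB : pvBval n b = n - 1 := by
      simp only [pvBval, hscan]
      rfl
    rw [hA, hB]
  · by_cases hn1 : n ≤ 1
    · have hn : n = 1 := by omega
      subst hn
      have hA : pvAval 1 b = 0 := by
        simp only [pvAval]
        have h01 : PySem.List.pyRange 0 1 1 = [0] := by
          simpa using PySem.List.pyRange_one_singleton (a := 0)
        rw [h01]
        simp only [List.foldl_cons, List.foldl_nil]
        rw [PySem.List.pyRange_one_eq_nil (by omega)]
        norm_num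
      have hstop : ∀ (ev od : Option (Int × Int)) (r : List Int),
          pvScanB 1 (PySem.List.enumerate r 1) ev od = (ev, od) := by
        intro ev od r
        cases r with
        | nil => rfl
        | cons y r' =>
          rw [PySem.List.enumerate_cons]
          simp [pvScanB]
      have hB : pvBval 1 b = 0 := by
        cases b with
        | nil =>
          simp [pvBval, PySem.List.enumerate_nil, pvScanB, pvBestB]
        | cons x r =>
          simp only [pvBval]
          rw [PySem.List.enumerate_cons]
          by_cases hm : PySem.Int.mod x 2 = 0
          · have hstep : pvScanB 1 ((0, x) :: PySem.List.enumerate r (0 + 1)) none none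
                = pvScanB 1 (PySem.List.enumerate r (0 + 1)) (pvUpd none 0) none := by
              simp only [pvScanB]
              rw [if_neg (by norm_num), if_pos hm]
            rw [hstep]
            norm_num
            rw [hstop]
            norm_num [pvUpd, pvBestB]
          · have hstep : pvScanB 1 ((0, x) :: PySem.List.enumerate r (0 + 1)) none none
                = pvScanB 1 (PySem.List.enumerate r (0 + 1)) none (pvUpd none 0) := by
              simp only [pvScanB]
              rw [if_neg (by norm_num), if_neg hm]
            rw [hstep]
            norm_num
            rw [hstop]
            norm_num [pvUpd, pvBestB]
      rw [hA, hB]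
    · -- main case: 2 ≤ n ≤ b.length
      have hlen : n ≤ (b.length : Int) := by
        rcases h with h' | h'
        · exact h'
        · omega
      have hk2 : 2 ≤ n := by omega
      set k := n.toNat with hkdef
      have hkn : (k : Int) = n := by omega
      have hkle : k ≤ b.length := by omega
      set c := b.take k with hcdef
      have hclen : c.length = k := by
        rw [hcdef, List.length_take]
        omega
      have hsplit : PySem.List.enumerate b 0
          = PySem.List.enumerate c 0 ++ PySem.List.enumerate (b.drop k) (0 + (c.length : Int)) := by
        conv_lhs => rw [← List.take_append_drop k b]
        rw [PySem.List.enumerate_append]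
      have hscan : pvScanB n (PySem.List.enumerate b 0) none none
          = (pvFL none (pvEIdx (PySem.List.enumerate c 0)), pvFL none (pvOIdx (PySem.List.enumerate c 0))) := by
        rw [hsplit]
        apply pv_scan_split
        · intro p hp
          rw [PySem.List.mem_enumerate_iff] at hp
          obtain ⟨m, hm, rfl⟩ := hp
          rw [hclen] at hm
          have : (m : Int) < (k : Int) := by exact_mod_cast hm
          simp only []
          omega
        · cases hd : b.drop k with
          | nil =>
            left
            exact PySem.List.enumerate_nil _
          | cons y tl =>
            right
            refine ⟨0 + (c.length : Int), y, PySem.List.enumerate tl (0 + (c.length : Int) + 1), ?_, ?_⟩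
            · rw [PySem.List.enumerate_cons]
            · rw [hclen]
              omega
      set E := pvEIdx (PySem.List.enumerate c 0) with hEdef
      set O := pvOIdx (PySem.List.enumerate c 0) with hOdef
      have hBv : pvBval n b
          = (match pvCombine (pvCand n E) (pvCand n O) with
             | some v => v
             | none => n - 1) := by
        simp only [pvBval, hscan]
        rw [pv_best_eq]
      have hgd : ∀ m : Nat, m < k → PySem.List.pyGetD b (m : Int) 0 = c.getD m 0 := by
        intro m hm
        rw [PySem.List.pyGetD_natCast, hcdef]
        rw [List.getD_eq_getElem?_getD, List.getD_eq_getElem?_getD, List.getElem?_take]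
        simp [hm]
      have hmemE : ∀ i : Int, i ∈ E ↔ ∃ m : Nat, m < k ∧ i = (m : Int) ∧
          PySem.Int.mod (PySem.List.pyGetD b (m : Int) 0) 2 = 0 := by
        intro i
        rw [hEdef, pv_mem_EIdx]
        constructor
        · rintro ⟨m, hm, rfl, hmod⟩
          rw [hclen] at hm
          exact ⟨m, hm, rfl, by rw [hgd m hm]; exact hmod⟩
        · rintro ⟨m, hm, rfl, hmod⟩
          exact ⟨m, by omega, rfl, by rw [← hgd m hm]; exact hmod⟩
      have hmemO : ∀ i : Int, i ∈ O ↔ ∃ m : Nat, m < k ∧ i = (m : Int) ∧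
          ¬ PySem.Int.mod (PySem.List.pyGetD b (m : Int) 0) 2 = 0 := by
        intro i
        rw [hOdef, pv_mem_OIdx]
        constructor
        · rintro ⟨m, hm, rfl, hmod⟩
          rw [hclen] at hm
          exact ⟨m, hm, rfl, by rw [hgd m hm]; exact hmod⟩
        · rintro ⟨m, hm, rfl, hmod⟩
          exact ⟨m, by omega, rfl, by rw [← hgd m hm]; exact hmod⟩
      have hsortE : E.Pairwise (· < ·) := by rw [hEdef]; exact pv_Idx_sorted c _
      have hsortO : O.Pairwise (· < ·) := by rw [hOdef]; exact pv_Idx_sorted c _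
      have hmod01 : ∀ x : Int, PySem.Int.mod x 2 = 0 ∨ PySem.Int.mod x 2 = 1 := by
        intro x
        have h1 := PySem.Int.mod_nonneg x (b := 2) (by norm_num)
        have h2 := PySem.Int.mod_lt x (b := 2) (by norm_num)
        omega
      have hLcand : ∀ L : List Int, L.Pairwise (· < ·) → ∀ i j : Int, i ∈ L → j ∈ L → i < j →
          ∃ cv, pvCand n L = some cv ∧ cv ≤ i + (n - 1 - j) := by
        intro L hsort i j hi hj hij
        cases L with
        | nil => simp at hi
        | cons h0 t0 =>
          obtain ⟨l0, hl0eq⟩ : ∃ l0, t0.getLastD h0 = l0 := ⟨_, rfl⟩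
          have hbi := pv_sorted_bounds hsort i hi
          have hbj := pv_sorted_bounds hsort j hj
          rw [hl0eq] at hbi hbj
          have hcond : h0 < l0 := by omega
          refine ⟨h0 + (n - 1 - l0), ?_, by omega⟩
          simp only [pvCand, hl0eq, if_pos hcond]
      have hcandV : ∀ L : List Int, (L = E ∨ L = O) → ∀ x, pvCand n L = some x → x ∈ pvV b n := by
        intro L hLEO x hx
        cases L with
        | nil => simp [pvCand] at hx
        | cons h0 t0 =>
          obtain ⟨l0, hl0eq⟩ : ∃ l0, t0.getLastD h0 = l0 := ⟨_, rfl⟩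
          by_cases hcond : h0 < l0
          · have hx' : x = h0 + (n - 1 - l0) := by
              simp only [pvCand, hl0eq, if_pos hcond, Option.some.injEq] at hx
              exact hx.symm
            have hh0 : h0 ∈ h0 :: t0 := by simp
            have hl0m : l0 ∈ h0 :: t0 := hl0eq ▸ List.getLastD_mem_cons
            rw [pv_mem_V]
            rcases hLEO with hLE | hLO
            · obtain ⟨m1, hm1, he1, hp1⟩ := (hmemE h0).mp (hLE ▸ hh0)
              obtain ⟨m2, hm2, he2, hp2⟩ := (hmemE l0).mp (hLE ▸ hl0m)
              refine ⟨h0, l0, by omega, hcond, by omega, ?_, by omega⟩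
              rw [he1, he2, pv_parity, hp1, hp2]
            · obtain ⟨m1, hm1, he1, hp1⟩ := (hmemO h0).mp (hLO ▸ hh0)
              obtain ⟨m2, hm2, he2, hp2⟩ := (hmemO l0).mp (hLO ▸ hl0m)
              refine ⟨h0, l0, by omega, hcond, by omega, ?_, by omega⟩
              rw [he1, he2, pv_parity]
              rcases hmod01 (PySem.List.pyGetD b (m1 : Int) 0) with hq1 | hq1
              · exact absurd hq1 hp1
              · rcases hmod01 (PySem.List.pyGetD b (m2 : Int) 0) with hq2 | hq2
                · exact absurd hq2 hp2
                · rw [hq1, hq2]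
          · simp only [pvCand, hl0eq, if_neg hcond] at hx
            exact absurd hx (by simp)
      have hC1 : ∀ v ∈ pvV b n, ∃ w, pvCombine (pvCand n E) (pvCand n O) = some w ∧ w ≤ v := by
        intro v hv
        rw [pv_mem_V] at hv
        obtain ⟨i, j, hi0, hij, hjn, hpar, rfl⟩ := hv
        rw [pv_parity] at hpar
        have hiN : i = ((i.toNat : Nat) : Int) := by omega
        have hjN : j = ((j.toNat : Nat) : Int) := by omega
        have hik : i.toNat < k := by omega
        have hjk : j.toNat < k := by omega
        by_cases hpe : PySem.Int.mod (PySem.List.pyGetD b i 0) 2 = 0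
        · have hiE : i ∈ E := (hmemE i).mpr ⟨i.toNat, hik, hiN, by rw [← hiN]; exact hpe⟩
          have hjE : j ∈ E := (hmemE j).mpr ⟨j.toNat, hjk, hjN, by rw [← hjN, ← hpar]; exact hpe⟩
          obtain ⟨cv, hcv, hcvle⟩ := hLcand E hsortE i j hiE hjE hij
          cases hcO : pvCand n O with
          | none => exact ⟨cv, by rw [hcv]; rfl, hcvle⟩
          | some y =>
            refine ⟨if y < cv then y else cv, by rw [hcv]; rfl, ?_⟩
            split_ifs with hy
            · omega
            · exact hcvle
        · have hiO : i ∈ O := (hmemO i).mpr ⟨i.toNat, hik, hiN, by rw [← hiN]; exact hpe⟩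
          have hjO : j ∈ O := (hmemO j).mpr ⟨j.toNat, hjk, hjN, by
            rw [← hjN, ← hpar]; exact hpe⟩
          obtain ⟨cv, hcv, hcvle⟩ := hLcand O hsortO i j hiO hjO hij
          cases hcE : pvCand n E with
          | none => exact ⟨cv, by rw [hcv]; rfl, hcvle⟩
          | some x =>
            refine ⟨if cv < x then cv else x, by rw [hcv]; rfl, ?_⟩
            split_ifs with hy
            · exact hcvle
            · omega
      have hC2 : ∀ w, pvCombine (pvCand n E) (pvCand n O) = some w → w ∈ pvV b n := by
        intro w hw
        cases hcE : pvCand n E with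
        | none =>
          cases hcO : pvCand n O with
          | none => rw [hcE, hcO] at hw; simp [pvCombine] at hw
          | some y =>
            rw [hcE, hcO] at hw
            simp only [pvCombine, Option.some.injEq] at hw
            rw [← hw]
            exact hcandV O (Or.inr rfl) y hcO
        | some x =>
          cases hcO : pvCand n O with
          | none =>
            rw [hcE, hcO] at hw
            simp only [pvCombine, Option.some.injEq] at hw
            rw [← hw]
            exact hcandV E (Or.inl rfl) x hcE
          | some y =>
            rw [hcE, hcO] at hw
            simp only [pvCombine, Option.some.injEq] at hw
            rw [← hw]
            split_ifs
            · exact hcandV O (Or.inr rfl) y hcO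
            · exact hcandV E (Or.inl rfl) x hcE
      rw [pv_Aval_eq, hBv]
      by_cases hVE : pvV b n = []
      · rw [hVE]
        cases hcomb : pvCombine (pvCand n E) (pvCand n O) with
        | none => simp
        | some w => exact absurd (hC2 w hcomb) (by rw [hVE]; simp)
      · have hvne : (pvV b n).isEmpty = false := by simp [hVE]
        obtain ⟨v0, hv0⟩ : ∃ v0, v0 ∈ pvV b n := by
          cases hV : pvV b n with
          | nil => exact absurd hV hVE
          | cons a tl => exact ⟨a, by simp⟩
        obtain ⟨w, hw, hwle⟩ := hC1 v0 hv0
        have hwV : w ∈ pvV b n := hC2 w hw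
        have hM1 : ∀ y ∈ pvV b n, (pvV b n).foldl min n ≤ y := (PySem.List.foldl_min_le (pvV b n) n).2
        have hMmem : (pvV b n).foldl min n ∈ pvV b n := by
          rcases PySem.List.foldl_min_mem (pvV b n) n with hMn | hMm
          · exfalso
            have h1 := hM1 v0 hv0
            have h2 := pv_V_lt b n v0 hv0
            omega
          · exact hMm
        obtain ⟨w', hw', hwle'⟩ := hC1 _ hMmem
        rw [hw] at hw'
        have hww : w = w' := Option.some.inj hw'
        have h1 : (pvV b n).foldl min n ≤ w := hM1 w hwV
        have h2 : w ≤ (pvV b n).foldl min n := by rw [hww]; exact hwle'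
        rw [hw, hvne]
        show (pvV b n).foldl min n = w
        omega

theorem pv_ports_eq (t : Int) (test_cases : List (Int × List Int))
    (h : Pre_min_operations_to_fashionable t test_cases) :
    min_operations_to_fashionable t test_cases = min_operations_to_fashionable_alt t test_cases := by
  have hA : min_operations_to_fashionable t test_cases
      = test_cases.foldl (fun results c =>
          results ++ [pvAval c.1 (PySem.List.sorted c.2 (fun x => x) false)]) [] := rfl
  have hB : min_operations_to_fashionable_alt t test_cases
      = test_cases.foldl (fun results c =>
          results ++ [pvBval c.1 (PySem.List.sorted c.2 (fun x => x) false)]) [] := rfl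
  rw [hA, hB]
  refine PySem.List.foldl_congr_mem _ _ _ _ ?_
  intro acc c hc
  have hlen : c.1 ≤ ((PySem.List.sorted c.2 (fun x => x) false).length : Int) ∨ c.1 ≤ 1 := by
    rcases h c hc with hle | hle
    · left
      rwa [PySem.List.length_sorted, ← PySem.List.len_eq]
    · right; exact hle
  rw [pv_case c.1 (PySem.List.sorted c.2 (fun x => x) false) hlen]

-- ===== VERDICT (by name: the statement is the Claim_ definition above) =====
theorem min_operations_to_fashionable_spec : Claim_equal_min_operations_to_fashionable := by
  intro t tc _ hpre
  exact (pv_ports_eq t tc hpre).symm ▸ rfl
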